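-- pv_equiv track=rewrite | github.com/damonc0313/Autonomous-Neural-self-coding-network | autonomous_evolution_engine.py | _add_memoization
-- ===== SOURCE A (Python) =====
-- def _add_memoization(code: str) -> str:
--     """Add memoization to functions."""
--     if '@lru_cache' in code or 'functools' in code:
--         return code  # Already has memoization
--
--     lines = code.split('\n')
--     modified_lines = []
--     added_import = False
--
--     for line in lines:
--         if line.strip().startswith('def ') and not added_import:
--             modified_lines.append('from functools import lru_cache')
--             modified_lines.append('')
--             modified_lines.append('@lru_cache(maxsize=128)')
--             added_import = True
--         modified_lines.append(line)
--
--     return '\n'.join(modified_lines)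
-- ===== SOURCE B (Python) =====
-- def _add_memoization(code: str) -> str:
--     """Add memoization to functions."""
--     if '@lru_cache' in code or 'functools' in code:
--         return code  # Already has memoization
--
--     lines = code.split('\n')
--     i = next((k for k, ln in enumerate(lines) if ln.strip().startswith('def ')), None)
--     if i is None:
--         return code
--
--     header = ['from functools import lru_cache', '', '@lru_cache(maxsize=128)']
--     return '\n'.join(lines[:i] + header + lines[i:])
-- ===== Notes on version B (the rewrite author's own statement) =====
-- stated objective: simpler
-- what changed: Instead of A's single accumulator loop threading an added_import flag and appending line by line, B finds the index of the first function-definition line once and builds the result by list slicing (lines[:i] + header + lines[i:]), returning the code unchanged when no such line exists.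
import Mathlib
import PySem

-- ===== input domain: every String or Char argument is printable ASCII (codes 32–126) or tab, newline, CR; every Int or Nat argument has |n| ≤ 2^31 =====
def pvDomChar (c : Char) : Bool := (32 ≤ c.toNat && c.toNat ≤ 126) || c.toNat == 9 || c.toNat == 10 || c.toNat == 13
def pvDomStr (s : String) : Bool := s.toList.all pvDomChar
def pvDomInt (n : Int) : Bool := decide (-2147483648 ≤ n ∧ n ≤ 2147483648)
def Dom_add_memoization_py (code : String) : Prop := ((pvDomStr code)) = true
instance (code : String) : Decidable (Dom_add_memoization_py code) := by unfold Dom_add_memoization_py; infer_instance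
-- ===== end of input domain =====

-- B computes the first-'def '-line index once and splices the header in by take/drop,
-- instead of A's accumulator loop with an added_import flag; objective: simpler.

-- ===== PORT A =====
-- line.strip().startswith('def ')
def pvIsDefLine (ln : List Char) : Bool :=
  PySem.Chars.startswith (PySem.Chars.strip ln) ("def ".toList)

-- the three inserted lines
def pvHeader : List (List Char) :=
  ["from functools import lru_cache".toList, [], "@lru_cache(maxsize=128)".toList]

def add_memoization_py (code : String) : String :=
  if PySem.Str.isIn "@lru_cache" code || PySem.Str.isIn "functools" code then code
  else
    let lines := PySem.Chars.splitOn code.toList ['\n']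
    let r := lines.foldl (fun (st : List (List Char) × Bool) line =>
      let st1 := if pvIsDefLine line && !st.2 then (st.1 ++ pvHeader, true) else st
      (st1.1 ++ [line], st1.2)) ([], false)
    String.ofList (PySem.Chars.join ['\n'] r.1)

-- ===== PORT B =====
def add_memoization_py_alt (code : String) : String :=
  if PySem.Str.isIn "@lru_cache" code || PySem.Str.isIn "functools" code then code
  else
    let lines := PySem.Chars.splitOn code.toList ['\n']
    match lines.findIdx? pvIsDefLine with
    | none => code
    | some i =>
        String.ofList (PySem.Chars.join ['\n'] (lines.take i ++ pvHeader ++ lines.drop i))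

-- ===== PRECONDITION & SPEC =====
def Spec_add_memoization_py (code : String) (out : String) : Prop := out = add_memoization_py_alt code
instance (code : String) (out : String) : Decidable (Spec_add_memoization_py code out) := by unfold Spec_add_memoization_py; infer_instance

-- ===== CLAIM (what is proved, stated in full; the proofs are below) =====
def Claim_equal_add_memoization_py : Prop := ∀ (code : String), Dom_add_memoization_py code → Spec_add_memoization_py code (add_memoization_py code)

-- ===== LEMMAS AND PROOFS =====

-- A's loop body
def pvStep (st : List (List Char) × Bool) (line : List Char) : List (List Char) × Bool :=
  let st1 := if pvIsDefLine line && !st.2 then (st.1 ++ pvHeader, true) else st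
  (st1.1 ++ [line], st1.2)

lemma pvLoop_true (lines : List (List Char)) :
    ∀ acc : List (List Char), lines.foldl pvStep (acc, true) = (acc ++ lines, true) := by
  induction lines with
  | nil => simp
  | cons ln rest ih =>
      intro acc
      simp [List.foldl_cons, pvStep, ih]

lemma pvLoop_false (lines : List (List Char)) :
    ∀ acc : List (List Char), lines.foldl pvStep (acc, false) =
      match lines.findIdx? pvIsDefLine with
      | none => (acc ++ lines, false)
      | some i => (acc ++ lines.take i ++ pvHeader ++ lines.drop i, true) := by
  induction lines with
  | nil => simp
  | cons ln rest ih =>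
      intro acc
      by_cases h : pvIsDefLine ln = true
      · simp [List.foldl_cons, pvStep, h, pvLoop_true, List.findIdx?_cons]
      · rw [List.foldl_cons, show pvStep (acc, false) ln = (acc ++ [ln], false) by
          simp [pvStep, h]]
        rw [ih]
        simp only [List.findIdx?_cons, h, Bool.false_eq_true, if_false]
        cases hf : rest.findIdx? pvIsDefLine with
        | none => simp
        | some i => simp [List.take_succ_cons, List.drop_succ_cons]

-- go with an accumulator: pieces of acc come out in front
lemma pvGo_acc (sep : List Char) (fuel : Nat) :
    ∀ (l cur : List Char) (acc : List (List Char)),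
      PySem.Chars.splitOn.go sep fuel l cur acc =
        acc.reverse ++ PySem.Chars.splitOn.go sep fuel l cur [] := by
  induction fuel with
  | zero => intro l cur acc; simp [PySem.Chars.splitOn.go]
  | succ fuel ih =>
      intro l cur acc
      cases l with
      | nil => simp [PySem.Chars.splitOn.go]
      | cons c rest =>
          simp only [PySem.Chars.splitOn.go]
          by_cases h : sep.isPrefixOf (c :: rest) = true
          · simp only [h, if_true]
            rw [ih _ _ (cur.reverse :: acc), ih _ _ [cur.reverse]]
            simp
          · simp only [h, Bool.false_eq_true, if_false]
            exact ih _ _ acc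

-- go always produces at least one piece
lemma pvGo_ne_nil (fuel : Nat) :
    ∀ (l cur : List Char), PySem.Chars.splitOn.go ['\n'] fuel l cur [] ≠ [] := by
  induction fuel with
  | zero => intro l cur; simp [PySem.Chars.splitOn.go]
  | succ fuel ih =>
      intro l cur
      cases l with
      | nil => simp [PySem.Chars.splitOn.go]
      | cons c rest =>
          simp only [PySem.Chars.splitOn.go]
          by_cases h : List.isPrefixOf ['\n'] (c :: rest) = true
          · simp only [h, if_true]
            rw [pvGo_acc]
            simp
          · simp only [h, Bool.false_eq_true, if_false]
            exact ih rest (c :: cur)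

-- intercalate on a cons with a nonempty tail
lemma pvIntercalate_cons (sep a : List Char) (ps : List (List Char)) (h : ps ≠ []) :
    List.intercalate sep (a :: ps) = a ++ sep ++ List.intercalate sep ps := by
  cases ps with
  | nil => exact absurd rfl h
  | cons b bs => simp [List.intercalate, List.intersperse]

-- joining the pieces of go restores the remaining input (single-char separator '\n')
lemma pvJoin_go (fuel : Nat) :
    ∀ (l cur : List Char), l.length < fuel →
      PySem.Chars.join ['\n'] (PySem.Chars.splitOn.go ['\n'] fuel l cur []) =
        cur.reverse ++ l := by
  induction fuel with
  | zero => intro l cur h; omega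
  | succ fuel ih =>
      intro l cur h
      cases l with
      | nil => simp [PySem.Chars.splitOn.go, PySem.Chars.join, List.intercalate]
      | cons c rest =>
          simp only [PySem.Chars.splitOn.go]
          have hrest : rest.length < fuel := Nat.lt_of_succ_lt_succ h
          by_cases hc : c = '\n'
          · subst hc
            have hpre : List.isPrefixOf ['\n'] ('\n' :: rest) = true := by
              simp [List.isPrefixOf]
            simp only [hpre, if_true]
            rw [pvGo_acc]
            rw [show List.drop (['\n'] : List Char).length ('\n' :: rest) = rest by simp]
            simp only [List.reverse_cons, List.reverse_nil, List.nil_append]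
            rw [show ([cur.reverse] : List (List Char)) ++
                PySem.Chars.splitOn.go ['\n'] fuel rest [] [] =
                cur.reverse :: PySem.Chars.splitOn.go ['\n'] fuel rest [] [] by simp]
            unfold PySem.Chars.join
            rw [pvIntercalate_cons _ _ _ (pvGo_ne_nil fuel rest [])]
            have := ih rest [] hrest
            unfold PySem.Chars.join at this
            rw [this]
            simp
          · have hpre : List.isPrefixOf ['\n'] (c :: rest) = false := by
              simp [List.isPrefixOf]
              intro hcontra; exact hc hcontra.symm
            simp only [hpre, Bool.false_eq_true, if_false]
            rw [ih rest (c :: cur) hrest]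
            simp

-- join ∘ splitOn by '\n' is the identity
lemma pvJoin_splitOn (s : List Char) :
    PySem.Chars.join ['\n'] (PySem.Chars.splitOn s ['\n']) = s := by
  have := pvJoin_go (s.length + 1) s [] (by omega)
  simpa [PySem.Chars.splitOn] using this

-- ===== VERDICT (by name: the statement is the Claim_ definition above) =====
theorem add_memoization_py_spec : Claim_equal_add_memoization_py := by
  intro code _
  unfold Spec_add_memoization_py add_memoization_py add_memoization_py_alt
  by_cases hg : (PySem.Str.isIn "@lru_cache" code || PySem.Str.isIn "functools" code) = true
  · rw [if_pos hg, if_pos hg]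
  · rw [if_neg hg, if_neg hg]
    show String.ofList (PySem.Chars.join ['\n']
        ((PySem.Chars.splitOn code.toList ['\n']).foldl pvStep ([], false)).1) =
      (match (PySem.Chars.splitOn code.toList ['\n']).findIdx? pvIsDefLine with
       | none => code
       | some i => String.ofList (PySem.Chars.join ['\n']
           ((PySem.Chars.splitOn code.toList ['\n']).take i ++ pvHeader ++
            (PySem.Chars.splitOn code.toList ['\n']).drop i)))
    rw [pvLoop_false]
    cases hf : (PySem.Chars.splitOn code.toList ['\n']).findIdx? pvIsDefLine with
    | none =>
        simp only [List.nil_append, pvJoin_splitOn]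
        exact String.ofList_toList
    | some i => simp
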